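-- pv_equiv track=rewrite | github.com/daniel-reich/ubiquitous-fiesta | oyS6TX4NXzpbfjL4a_4.py | best_start
-- ===== SOURCE A (Python) =====
-- def best_start(lst, word):
--   letters = ["A", "B", "C", "D", "E", "F", "G", "H", "I", "J", "K", "L",
--    "M", "N", "O", "P", "Q", "R", "S", "T", "U", "V", "W", "X", "Y", "Z"]
--   points = [1, 3, 3, 2, 1, 4, 2, 4, 1, 8, 5, 1,
--   3, 4, 1, 3, 10, 1, 1, 1, 1, 4, 4, 8, 4, 10]
--   letter_to_points = {key: value for key, value in zip(letters, points)}
--   word_values = [letter_to_points[letter.upper()] for letter in word]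
--   move = {}
--   for i in range(len(lst) - len(word) + 1):
--     word_score = 0
--     multiplier = 1
--     for j in range(len(word)):
--       if lst[i+j] == 'DL':
--         word_score += word_values[j] * 2
--       elif lst[i+j] == 'TL':
--         word_score += word_values[j] * 3
--       elif lst[i+j] == 'DW':
--         multiplier = 2
--       else:
--         word_score += word_values[j]
--     move[i] = word_score * multiplier
--   return max(move, key=move.get)
-- ===== SOURCE B (Python) =====
-- _PTS = (1, 3, 3, 2, 1, 4, 2, 4, 1, 8, 5, 1,
--         3, 4, 1, 3, 10, 1, 1, 1, 1, 4, 4, 8, 4, 10)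
--
--
-- def best_start(lst, word):
--     # Scatter algorithm: start every window at the plain word total, then let each
--     # special board cell (DL/TL/DW) push its adjustment into the windows covering it;
--     # ordinary cells trigger no work at all.
--     wv = [_PTS[ord(c.upper()) - 65] for c in word]
--     n, m = len(lst), len(word)
--     w = n - m + 1
--     total = sum(wv)
--     scores = [total] * w
--     dw = [False] * w
--     for k, cell in enumerate(lst):
--         if cell == 'DL' or cell == 'TL' or cell == 'DW':
--             for i in range(max(0, k - m + 1), min(k, w - 1) + 1):
--                 if cell == 'DL':
--                     scores[i] += wv[k - i]
--                 elif cell == 'TL':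
--                     scores[i] += 2 * wv[k - i]
--                 else:
--                     scores[i] -= wv[k - i]
--                     dw[i] = True
--     best_i = 0
--     best_s = None
--     for i in range(w):
--         v = 2 * scores[i] if dw[i] else scores[i]
--         if best_s is None or v > best_s:
--             best_i, best_s = i, v
--     return best_i
-- ===== Notes on version B (the rewrite author's own statement) =====
-- stated objective: alternative
-- what changed: B inverts A's per-window gather into a scatter algorithm: every window starts at the plain word total and each special board cell (DL/TL/DW) pushes its adjustment into the score/DW tables of the windows covering it, so ordinary cells trigger no per-window work; a final linear scan takes the first argmax.
import Mathlib
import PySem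

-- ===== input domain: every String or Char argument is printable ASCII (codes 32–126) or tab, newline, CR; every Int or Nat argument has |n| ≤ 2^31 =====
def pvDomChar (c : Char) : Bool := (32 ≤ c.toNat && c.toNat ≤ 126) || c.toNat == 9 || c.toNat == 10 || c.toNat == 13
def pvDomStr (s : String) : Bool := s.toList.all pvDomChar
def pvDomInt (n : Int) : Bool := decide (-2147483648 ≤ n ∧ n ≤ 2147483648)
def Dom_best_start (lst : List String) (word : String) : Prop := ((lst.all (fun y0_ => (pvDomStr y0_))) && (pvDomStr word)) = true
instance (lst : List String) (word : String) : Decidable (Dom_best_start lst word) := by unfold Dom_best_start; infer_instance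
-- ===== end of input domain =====

-- One honest line: B replaces A's per-window gather (inner loop over the word for every start)
-- by a scatter: every window starts at the plain word total and each special cell (DL/TL/DW)
-- pushes its adjustment into the score/DW tables of the windows covering it; first argmax at the end.

-- ===== PORT A =====
def pvLettersA : List String := ["A", "B", "C", "D", "E", "F", "G", "H", "I", "J", "K", "L",
  "M", "N", "O", "P", "Q", "R", "S", "T", "U", "V", "W", "X", "Y", "Z"]
def pvPointsA : List Int := [1, 3, 3, 2, 1, 4, 2, 4, 1, 8, 5, 1,
  3, 4, 1, 3, 10, 1, 1, 1, 1, 4, 4, 8, 4, 10]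

def best_start (lst : List String) (word : String) : Int :=
  let letter_to_points : PySem.Dict String Int :=
    (pvLettersA.zip pvPointsA).foldl (fun d kv => d.insert kv.1 kv.2) PySem.Dict.empty
  -- letter_to_points[letter.upper()]: KeyError (= none) is excluded by Pre_; getD 0 never read inside Pre_
  let word_values : List Int :=
    word.toList.map (fun letter => (letter_to_points.get? (PySem.Str.upper (String.singleton letter))).getD 0)
  let move : PySem.Dict Int Int :=
    (PySem.List.pyRange 0 ((lst.length : Int) - (word.toList.length : Int) + 1) 1).foldl (fun mv i =>
      let p : Int × Int :=
        (PySem.List.pyRange 0 (word.toList.length : Int) 1).foldl (fun (p : Int × Int) j =>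
          if PySem.List.pyGetD lst (i + j) "" = "DL" then (p.1 + PySem.List.pyGetD word_values j 0 * 2, p.2)
          else if PySem.List.pyGetD lst (i + j) "" = "TL" then (p.1 + PySem.List.pyGetD word_values j 0 * 3, p.2)
          else if PySem.List.pyGetD lst (i + j) "" = "DW" then (p.1, 2)
          else (p.1 + PySem.List.pyGetD word_values j 0, p.2)) (0, 1)
      mv.insert i (p.1 * p.2)) PySem.Dict.empty
  -- max(move, key=move.get): ValueError on an empty dict (= none) is excluded by Pre_
  (PySem.List.max? move.keys (fun k => move.getD k 0)).getD 0

-- ===== PORT B =====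
def pvPtsB : List Int := [1, 3, 3, 2, 1, 4, 2, 4, 1, 8, 5, 1,
  3, 4, 1, 3, 10, 1, 1, 1, 1, 4, 4, 8, 4, 10]

def best_start_alt (lst : List String) (word : String) : Int :=
  -- wv = [_PTS[ord(c.upper()) - 65] for c in word]; IndexError (= default never read) excluded by Pre_
  let wv : List Int := word.toList.map (fun c =>
    PySem.List.pyGetD pvPtsB (((PySem.Chars.upperChar c).toNat : Int) - 65) 0)
  let m : Int := (word.toList.length : Int)
  let w : Int := (lst.length : Int) - m + 1
  let total : Int := wv.sum
  -- scores = [total]*w ; dw = [False]*w  (Python's list * negative = [])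
  let sd : List Int × List Bool :=
    (PySem.List.enumerate lst).foldl (fun (sd : List Int × List Bool) kc =>
      if kc.2 = "DL" ∨ kc.2 = "TL" ∨ kc.2 = "DW" then
        (PySem.List.pyRange (max 0 (kc.1 - m + 1)) (min kc.1 (w - 1) + 1) 1).foldl (fun sd i =>
          if kc.2 = "DL" then
            (PySem.List.pySetD sd.1 i (PySem.List.pyGetD sd.1 i 0 + PySem.List.pyGetD wv (kc.1 - i) 0), sd.2)
          else if kc.2 = "TL" then
            (PySem.List.pySetD sd.1 i (PySem.List.pyGetD sd.1 i 0 + 2 * PySem.List.pyGetD wv (kc.1 - i) 0), sd.2)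
          else
            (PySem.List.pySetD sd.1 i (PySem.List.pyGetD sd.1 i 0 - PySem.List.pyGetD wv (kc.1 - i) 0),
             PySem.List.pySetD sd.2 i true)) sd
      else sd) (List.replicate w.toNat total, List.replicate w.toNat false)
  ((PySem.List.pyRange 0 w 1).foldl (fun (best : Int × Option Int) i =>
      let v : Int := if PySem.List.pyGetD sd.2 i false then 2 * PySem.List.pyGetD sd.1 i 0
                     else PySem.List.pyGetD sd.1 i 0
      match best.2 with
      | none => (i, some v)
      | some b => if b < v then (i, some v) else best) ((0 : Int), (none : Option Int))).1

-- ===== PRECONDITION & SPEC =====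
-- Pre_ excludes exactly the inputs where A raises: a word character that is not an ASCII letter
-- (KeyError in the letter_to_points lookup) and len(word) > len(lst) (empty dict, max raises ValueError).
def pvLetterChars : List Char :=
  ['A','B','C','D','E','F','G','H','I','J','K','L','M','N','O','P','Q','R','S','T','U','V','W','X','Y','Z',
   'a','b','c','d','e','f','g','h','i','j','k','l','m','n','o','p','q','r','s','t','u','v','w','x','y','z']
def Pre_best_start (lst : List String) (word : String) : Prop :=
  (word.toList.all (fun c => pvLetterChars.contains c)) = true ∧ word.toList.length ≤ lst.length
instance (lst : List String) (word : String) : Decidable (Pre_best_start lst word) := by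
  unfold Pre_best_start; infer_instance
def pvWitness_best_start : List String × String := (["DL", "A", "DW"], "AB")

def Spec_best_start (lst : List String) (word : String) (out : Int) : Prop := out = best_start_alt lst word
instance (lst : List String) (word : String) (out : Int) : Decidable (Spec_best_start lst word out) := by
  unfold Spec_best_start; infer_instance

-- ===== CLAIM (what is proved, stated in full; the proofs are below) =====
def Claim_equal_best_start : Prop := ∀ (lst : List String) (word : String), Dom_best_start lst word → Pre_best_start lst word → Spec_best_start lst word (best_start lst word)

-- ===== LEMMAS AND PROOFS =====

-- B's letter value as a named function (proof-side only; the port inlines it)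
def pvPtB (c : Char) : Int :=
  PySem.List.pyGetD pvPtsB (((PySem.Chars.upperChar c).toNat : Int) - 65) 0

-- A's per-window score (the inner loop of A), used only by the proofs
def pvScoreA (lst : List String) (wv : List Int) (m i : Int) : Int :=
  ((PySem.List.pyRange 0 m).foldl (fun (p : Int × Int) j =>
    if PySem.List.pyGetD lst (i + j) "" = "DL" then (p.1 + PySem.List.pyGetD wv j 0 * 2, p.2)
    else if PySem.List.pyGetD lst (i + j) "" = "TL" then (p.1 + PySem.List.pyGetD wv j 0 * 3, p.2)
    else if PySem.List.pyGetD lst (i + j) "" = "DW" then (p.1, 2)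
    else (p.1 + PySem.List.pyGetD wv j 0, p.2)) (0, 1))
  |> (fun p => p.1 * p.2)

-- the 52 letters: A's dict lookup equals B's table lookup (a finite ground fact, checked by the kernel)
theorem pvCharVal_all : (pvLetterChars.all (fun c =>
    (((pvLettersA.zip pvPointsA).foldl (fun d kv => d.insert kv.1 kv.2) PySem.Dict.empty).get?
      (PySem.Str.upper (String.singleton c))).getD 0 == pvPtB c)) = true := rfl

theorem pvCharVal_eq : ∀ c ∈ pvLetterChars,
    (((pvLettersA.zip pvPointsA).foldl (fun d kv => d.insert kv.1 kv.2) PySem.Dict.empty).get?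
      (PySem.Str.upper (String.singleton c))).getD 0 = pvPtB c := by
  intro c hc
  exact beq_iff_eq.mp (List.all_eq_true.mp pvCharVal_all c hc)

-- 'multiplier = 2 once a DW is seen' collapses to an existence test
theorem pvFoldTwo (l : List Int) (p : Int → Prop) [DecidablePred p] (a : Int) :
    l.foldl (fun m j => if p j then 2 else m) a = if ∃ j ∈ l, p j then 2 else a := by
  induction l generalizing a with
  | nil => simp
  | cons x t ih =>
    simp only [List.foldl_cons]
    rw [ih]
    by_cases hx : p x <;> by_cases ht : ∃ j ∈ t, p j <;>
      simp only [List.exists_mem_cons_iff, hx, ht, if_false, or_true, or_false, if_pos]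

theorem pvFindMap (f : Int → Int) : ∀ (l : List Int), l.Nodup → ∀ i ∈ l,
    List.find? (fun p => p.1 == i) (l.map fun x => (x, f x)) = some (i, f i) := by
  intro l
  induction l with
  | nil => simp
  | cons x t ih =>
    intro hnd i hi
    simp only [List.map_cons]
    rcases List.mem_cons.mp hi with rfl | hmem
    · rw [List.find?_cons_of_pos (by simp)]
    · have hx : x ≠ i := fun h => (List.nodup_cons.mp hnd).1 (h ▸ hmem)
      rw [List.find?_cons_of_neg (by simpa using hx)]
      exact ih (List.nodup_cons.mp hnd).2 i hmem

theorem pvMaxAux (f g : Int → Int) (sf sg : Option Int → Int → Option Int)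
    (hf1 : ∀ x, sf none x = some x)
    (hf2 : ∀ m x, sf (some m) x = if f m < f x then some x else some m)
    (hg1 : ∀ x, sg none x = some x)
    (hg2 : ∀ m x, sg (some m) x = if g m < g x then some x else some m) :
    ∀ (l : List Int) (acc : Option Int),
    (∀ x ∈ l, f x = g x) → (∀ x, acc = some x → f x = g x) →
    l.foldl sf acc = l.foldl sg acc := by
  intro l
  induction l with
  | nil => intro acc _ _; rfl
  | cons a t ih =>
    intro acc hl hacc
    have ha : f a = g a := hl a (by simp)
    have hl' : ∀ x ∈ t, f x = g x := fun x hx => hl x (by simp [hx])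
    cases acc with
    | none =>
      rw [List.foldl_cons, List.foldl_cons, hf1, hg1]
      exact ih (some a) hl' (fun x hx => by cases hx; exact ha)
    | some m =>
      have hm : f m = g m := hacc m rfl
      rw [List.foldl_cons, List.foldl_cons, hf2, hg2, hm, ha]
      by_cases hc : g m < g a
      · rw [if_pos hc]
        exact ih (some a) hl' (fun x hx => by cases hx; exact ha)
      · rw [if_neg hc]
        exact ih (some m) hl' (fun x hx => by cases hx; exact hacc _ rfl)

theorem pvMaxCongr (l : List Int) (f g : Int → Int) (h : ∀ x ∈ l, f x = g x) :
    PySem.List.max? l f = PySem.List.max? l g := by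
  unfold PySem.List.max?
  exact pvMaxAux f g _ _ (fun x => rfl) (fun m x => rfl) (fun x => rfl) (fun m x => rfl)
    l none h (fun x hx => by cases hx)

def pvStepM (f : Int → Int) : Option Int → Int → Option Int := fun acc x =>
  match acc with
  | none => some x
  | some m => if f m < f x then some x else some m

theorem pvMaxUnfold (f : Int → Int) (l : List Int) :
    PySem.List.max? l f = l.foldl (pvStepM f) none := by
  unfold PySem.List.max?
  exact pvMaxAux f f _ (pvStepM f) (fun x => rfl) (fun m x => rfl) (fun x => rfl)
    (fun m x => rfl) l none (fun x _ => rfl) (fun x hx => rfl)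

theorem pvArgmaxA (l : List Int) (hnd : l.Nodup) (f : Int → Int) :
    (PySem.List.max?
      ((l.foldl (fun mv i => mv.insert i (f i)) (PySem.Dict.empty : PySem.Dict Int Int)).keys)
      (fun k => (l.foldl (fun mv i => mv.insert i (f i)) (PySem.Dict.empty : PySem.Dict Int Int)).getD k 0)).getD 0
    = (PySem.List.max? l f).getD 0 := by
  have hitems : (l.foldl (fun mv i => mv.insert i (f i)) (PySem.Dict.empty : PySem.Dict Int Int)).items
      = l.map (fun i => (i, f i)) := by
    have := PySem.Dict.items_foldl_insert_fresh (κ := Int) (ν := Int) l (fun i => i) f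
      PySem.Dict.empty (fun a _ => by simp [pysem]) (by simpa using hnd)
    simpa using this
  have hkeys : (l.foldl (fun mv i => mv.insert i (f i)) (PySem.Dict.empty : PySem.Dict Int Int)).keys = l := by
    simp only [PySem.Dict.keys, hitems, List.map_map]
    exact List.map_id'' (fun x => rfl) l
  have hgetD : ∀ k ∈ l,
      (l.foldl (fun mv i => mv.insert i (f i)) (PySem.Dict.empty : PySem.Dict Int Int)).getD k 0 = f k := by
    intro k hk
    simp only [PySem.Dict.getD, PySem.Dict.get?, hitems]
    rw [pvFindMap f l hnd k hk]
    rfl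
  rw [hkeys, pvMaxCongr l _ f hgetD]

-- B's running-best loop is the first argmax over l
theorem pvFoldBAux (f : Int → Int)
    (sB : (Int × Option Int) → Int → (Int × Option Int))
    (sM : Option Int → Int → Option Int)
    (hB2 : ∀ p b i, sB (p, some b) i = if b < f i then (i, some (f i)) else (p, some b))
    (hM2 : ∀ m i, sM (some m) i = if f m < f i then some i else some m) :
    ∀ (l : List Int) (m : Int),
    ∃ m', l.foldl sM (some m) = some m' ∧ l.foldl sB (m, some (f m)) = (m', some (f m')) := by
  intro l
  induction l with
  | nil => intro m; exact ⟨m, rfl, rfl⟩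
  | cons a t ih =>
    intro m
    rw [List.foldl_cons, List.foldl_cons, hB2, hM2]
    by_cases hc : f m < f a
    · simpa only [if_pos hc] using ih a
    · simpa only [if_neg hc] using ih m

theorem pvFoldB (f : Int → Int)
    (sB : (Int × Option Int) → Int → (Int × Option Int))
    (hB1 : ∀ p i, sB (p, none) i = (i, some (f i)))
    (hB2 : ∀ p b i, sB (p, some b) i = if b < f i then (i, some (f i)) else (p, some b))
    (l : List Int) (d : Int) :
    (l.foldl sB ((d : Int), (none : Option Int))).1 = (PySem.List.max? l f).getD d := by
  rw [pvMaxUnfold f l]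
  cases l with
  | nil => rfl
  | cons a t =>
    rw [List.foldl_cons, List.foldl_cons, hB1]
    obtain ⟨m', h1, h2⟩ := pvFoldBAux f sB (pvStepM f) hB2 (fun m i => rfl) t a
    rw [h2, show pvStepM f none a = some a from rfl, h1]
    rfl

-- one cell's contribution, as A computes it
def pvG (lst : List String) (wv : List Int) (i j : Int) : Int :=
  if PySem.List.pyGetD lst (i + j) "" = "DL" then PySem.List.pyGetD wv j 0 * 2
  else if PySem.List.pyGetD lst (i + j) "" = "TL" then PySem.List.pyGetD wv j 0 * 3
  else if PySem.List.pyGetD lst (i + j) "" = "DW" then 0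
  else PySem.List.pyGetD wv j 0

-- the adjustment B's scatter pushes from board cell (k, cell) into window idx
def pvDelta (wv : List Int) (m : Int) (kc : Int × String) (idx : Int) : Int :=
  if idx ≤ kc.1 ∧ kc.1 < idx + m then
    (if kc.2 = "DL" then PySem.List.pyGetD wv (kc.1 - idx) 0
     else if kc.2 = "TL" then 2 * PySem.List.pyGetD wv (kc.1 - idx) 0
     else if kc.2 = "DW" then - PySem.List.pyGetD wv (kc.1 - idx) 0 else 0)
  else 0

-- scatter over a contiguous index range, read back pointwise
theorem pvScat {α : Type} (f : α → Int → α) (d : α) :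
    ∀ (fuel : Nat) (lo hi : Int) (s : List α), 0 ≤ lo → fuel = (hi - lo).toNat →
    hi ≤ (s.length : Int) →
    ((PySem.List.pyRange lo hi 1).foldl
        (fun s i => PySem.List.pySetD s i (f (PySem.List.pyGetD s i d) i)) s).length = s.length ∧
    ∀ idx : Int, 0 ≤ idx →
      PySem.List.pyGetD
        ((PySem.List.pyRange lo hi 1).foldl
          (fun s i => PySem.List.pySetD s i (f (PySem.List.pyGetD s i d) i)) s) idx d
      = if lo ≤ idx ∧ idx < hi then f (PySem.List.pyGetD s idx d) idx
        else PySem.List.pyGetD s idx d := by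
  intro fuel
  induction fuel with
  | zero =>
    intro lo hi s hlo hfuel hhi
    rw [PySem.List.pyRange_one_eq_nil (by omega)]
    refine ⟨rfl, fun idx _ => ?_⟩
    rw [List.foldl_nil, if_neg (by omega)]
  | succ n ih =>
    intro lo hi s hlo hfuel hhi
    by_cases hlt : lo < hi
    · rw [PySem.List.pyRange_one_cons hlt, List.foldl_cons]
      have hset : PySem.List.pySetD s lo (f (PySem.List.pyGetD s lo d) lo)
          = s.set lo.toNat (f (PySem.List.pyGetD s lo d) lo) :=
        PySem.List.pySetD_of_nonneg _ _ hlo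
      have hlen' : (PySem.List.pySetD s lo (f (PySem.List.pyGetD s lo d) lo)).length = s.length := by
        rw [hset, List.length_set]
      obtain ⟨ihlen, ihget⟩ := ih (lo + 1) hi
        (PySem.List.pySetD s lo (f (PySem.List.pyGetD s lo d) lo))
        (by omega) (by omega) (by omega)
      refine ⟨by rw [ihlen, hlen'], fun idx hidx => ?_⟩
      rw [ihget idx hidx]
      have hmid : ∀ j : Int, 0 ≤ j →
          PySem.List.pyGetD (PySem.List.pySetD s lo (f (PySem.List.pyGetD s lo d) lo)) j d
          = if j = lo then f (PySem.List.pyGetD s lo d) lo else PySem.List.pyGetD s j d := by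
        intro j hj
        obtain ⟨jn, rfl⟩ : ∃ jn : Nat, j = (jn : Int) := ⟨j.toNat, by omega⟩
        obtain ⟨ln, hln⟩ : ∃ ln : Nat, lo = (ln : Int) := ⟨lo.toNat, by omega⟩
        rw [hln, PySem.List.pyGetD_pySetD_natCast s ln jn _ _ (by omega)]
        simp only [Int.natCast_inj]
      by_cases he : idx = lo
      · subst he
        rw [if_neg (by omega), hmid idx hidx, if_pos rfl, if_pos (by omega)]
      · rw [hmid idx hidx, if_neg he]
        by_cases hin : lo + 1 ≤ idx ∧ idx < hi
        · rw [if_pos hin, if_pos (by omega)]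
        · rw [if_neg hin, if_neg (by omega)]
    · rw [PySem.List.pyRange_one_eq_nil (by omega)]
      refine ⟨rfl, fun idx _ => ?_⟩
      rw [List.foldl_nil, if_neg (by omega)]

-- B's scatter step for one enumerated board cell (proof-side name for the port's loop body)
def pvStepB (wv : List Int) (m w : Int) (sd : List Int × List Bool) (kc : Int × String) :
    List Int × List Bool :=
  if kc.2 = "DL" ∨ kc.2 = "TL" ∨ kc.2 = "DW" then
    (PySem.List.pyRange (max 0 (kc.1 - m + 1)) (min kc.1 (w - 1) + 1) 1).foldl (fun sd i =>
      if kc.2 = "DL" then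
        (PySem.List.pySetD sd.1 i (PySem.List.pyGetD sd.1 i 0 + PySem.List.pyGetD wv (kc.1 - i) 0), sd.2)
      else if kc.2 = "TL" then
        (PySem.List.pySetD sd.1 i (PySem.List.pyGetD sd.1 i 0 + 2 * PySem.List.pyGetD wv (kc.1 - i) 0), sd.2)
      else
        (PySem.List.pySetD sd.1 i (PySem.List.pyGetD sd.1 i 0 - PySem.List.pyGetD wv (kc.1 - i) 0),
         PySem.List.pySetD sd.2 i true)) sd
  else sd

theorem pvFoldConst {β γ : Type} (l : List γ) (b : β) : l.foldl (fun b _ => b) b = b := by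
  induction l with
  | nil => rfl
  | cons x t ih => simp [ih]

-- one scatter step, read back pointwise
theorem pvStepB_char (wv : List Int) (m w : Int) (hw : 0 ≤ w) (kc : Int × String)
    (sd : List Int × List Bool) (h1 : sd.1.length = w.toNat) (h2 : sd.2.length = w.toNat) :
    (pvStepB wv m w sd kc).1.length = w.toNat ∧ (pvStepB wv m w sd kc).2.length = w.toNat ∧
    ∀ idx : Int, 0 ≤ idx → idx < w →
      PySem.List.pyGetD (pvStepB wv m w sd kc).1 idx 0
        = PySem.List.pyGetD sd.1 idx 0 + pvDelta wv m kc idx ∧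
      PySem.List.pyGetD (pvStepB wv m w sd kc).2 idx false
        = (PySem.List.pyGetD sd.2 idx false
           || (kc.2 == "DW" && decide (idx ≤ kc.1 ∧ kc.1 < idx + m))) := by
  obtain ⟨k, c⟩ := kc
  by_cases hsp : c = "DL" ∨ c = "TL" ∨ c = "DW"
  case neg =>
    unfold pvStepB
    rw [if_neg (by simpa using hsp)]
    push Not at hsp
    refine ⟨h1, h2, fun idx hidx hidxw => ⟨?_, ?_⟩⟩
    · have : pvDelta wv m (k, c) idx = 0 := by
        unfold pvDelta
        simp only [hsp.1, hsp.2.1, hsp.2.2, if_false]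
        split_ifs <;> rfl
      rw [this]; ring
    · simp [hsp.2.2]
  case pos =>
    have hguard : ∀ idx : Int, 0 ≤ idx → idx < w →
        ((max 0 (k - m + 1) ≤ idx ∧ idx < min k (w - 1) + 1) ↔ (idx ≤ k ∧ k < idx + m)) := by
      intro idx h0 h1; omega
    rcases hsp with hx | hx | hx <;> subst hx
    · -- DL
      unfold pvStepB
      rw [if_pos (Or.inl rfl)]
      have hf : (fun (sd : List Int × List Bool) (i : Int) =>
          if ("DL" : String) = "DL" then
            (PySem.List.pySetD sd.1 i (PySem.List.pyGetD sd.1 i 0 + PySem.List.pyGetD wv (k - i) 0), sd.2)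
          else if ("DL" : String) = "TL" then
            (PySem.List.pySetD sd.1 i (PySem.List.pyGetD sd.1 i 0 + 2 * PySem.List.pyGetD wv (k - i) 0), sd.2)
          else
            (PySem.List.pySetD sd.1 i (PySem.List.pyGetD sd.1 i 0 - PySem.List.pyGetD wv (k - i) 0),
             PySem.List.pySetD sd.2 i true))
          = fun sd i =>
            (PySem.List.pySetD sd.1 i
              ((fun v i => v + PySem.List.pyGetD wv (k - i) 0) (PySem.List.pyGetD sd.1 i 0) i), sd.2) := by
        funext sd i; rw [if_pos rfl]
      rw [hf, PySem.List.foldl_prod_mk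
        (f := fun (s : List Int) (i : Int) =>
          PySem.List.pySetD s i ((fun v i => v + PySem.List.pyGetD wv (k - i) 0) (PySem.List.pyGetD s i 0) i))
        (g := fun (b : List Bool) (_ : Int) => b), pvFoldConst]
      obtain ⟨hlen, hget⟩ := pvScat (fun v i => v + PySem.List.pyGetD wv (k - i) 0) 0
        ((min k (w - 1) + 1 - max 0 (k - m + 1)).toNat) (max 0 (k - m + 1)) (min k (w - 1) + 1)
        sd.1 (by omega) rfl (by omega)
      refine ⟨by rw [hlen, h1], h2, fun idx hidx hidxw => ⟨?_, by simp⟩⟩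
      rw [hget idx hidx]
      unfold pvDelta
      by_cases hg : idx ≤ k ∧ k < idx + m
      · rw [if_pos ((hguard idx hidx hidxw).mpr hg), if_pos hg, if_pos rfl]
      · rw [if_neg (fun h => hg ((hguard idx hidx hidxw).mp h)), if_neg hg]; ring
    · -- TL
      unfold pvStepB
      rw [if_pos (Or.inr (Or.inl rfl))]
      have hf : (fun (sd : List Int × List Bool) (i : Int) =>
          if ("TL" : String) = "DL" then
            (PySem.List.pySetD sd.1 i (PySem.List.pyGetD sd.1 i 0 + PySem.List.pyGetD wv (k - i) 0), sd.2)
          else if ("TL" : String) = "TL" then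
            (PySem.List.pySetD sd.1 i (PySem.List.pyGetD sd.1 i 0 + 2 * PySem.List.pyGetD wv (k - i) 0), sd.2)
          else
            (PySem.List.pySetD sd.1 i (PySem.List.pyGetD sd.1 i 0 - PySem.List.pyGetD wv (k - i) 0),
             PySem.List.pySetD sd.2 i true))
          = fun sd i =>
            (PySem.List.pySetD sd.1 i
              ((fun v i => v + 2 * PySem.List.pyGetD wv (k - i) 0) (PySem.List.pyGetD sd.1 i 0) i), sd.2) := by
        funext sd i
        rw [if_neg (by simp), if_pos rfl]
      rw [hf, PySem.List.foldl_prod_mk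
        (f := fun (s : List Int) (i : Int) =>
          PySem.List.pySetD s i ((fun v i => v + 2 * PySem.List.pyGetD wv (k - i) 0) (PySem.List.pyGetD s i 0) i))
        (g := fun (b : List Bool) (_ : Int) => b), pvFoldConst]
      obtain ⟨hlen, hget⟩ := pvScat (fun v i => v + 2 * PySem.List.pyGetD wv (k - i) 0) 0
        ((min k (w - 1) + 1 - max 0 (k - m + 1)).toNat) (max 0 (k - m + 1)) (min k (w - 1) + 1)
        sd.1 (by omega) rfl (by omega)
      refine ⟨by rw [hlen, h1], h2, fun idx hidx hidxw => ⟨?_, by simp⟩⟩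
      rw [hget idx hidx]
      unfold pvDelta
      by_cases hg : idx ≤ k ∧ k < idx + m
      · rw [if_pos ((hguard idx hidx hidxw).mpr hg), if_pos hg, if_neg (by simp), if_pos rfl]
      · rw [if_neg (fun h => hg ((hguard idx hidx hidxw).mp h)), if_neg hg]; ring
    · -- DW
      unfold pvStepB
      rw [if_pos (Or.inr (Or.inr rfl))]
      have hf : (fun (sd : List Int × List Bool) (i : Int) =>
          if ("DW" : String) = "DL" then
            (PySem.List.pySetD sd.1 i (PySem.List.pyGetD sd.1 i 0 + PySem.List.pyGetD wv (k - i) 0), sd.2)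
          else if ("DW" : String) = "TL" then
            (PySem.List.pySetD sd.1 i (PySem.List.pyGetD sd.1 i 0 + 2 * PySem.List.pyGetD wv (k - i) 0), sd.2)
          else
            (PySem.List.pySetD sd.1 i (PySem.List.pyGetD sd.1 i 0 - PySem.List.pyGetD wv (k - i) 0),
             PySem.List.pySetD sd.2 i true))
          = fun sd i =>
            (PySem.List.pySetD sd.1 i
              ((fun v i => v - PySem.List.pyGetD wv (k - i) 0) (PySem.List.pyGetD sd.1 i 0) i),
             PySem.List.pySetD sd.2 i ((fun (_ : Bool) (_ : Int) => true) (PySem.List.pyGetD sd.2 i false) i)) := by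
        funext sd i
        rw [if_neg (by simp), if_neg (by simp)]
      rw [hf, PySem.List.foldl_prod_mk
        (f := fun (s : List Int) (i : Int) =>
          PySem.List.pySetD s i ((fun v i => v - PySem.List.pyGetD wv (k - i) 0) (PySem.List.pyGetD s i 0) i))
        (g := fun (b : List Bool) (i : Int) =>
          PySem.List.pySetD b i ((fun (_ : Bool) (_ : Int) => true) (PySem.List.pyGetD b i false) i))]
      obtain ⟨hlen1, hget1⟩ := pvScat (fun v i => v - PySem.List.pyGetD wv (k - i) 0) 0
        ((min k (w - 1) + 1 - max 0 (k - m + 1)).toNat) (max 0 (k - m + 1)) (min k (w - 1) + 1)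
        sd.1 (by omega) rfl (by omega)
      obtain ⟨hlen2, hget2⟩ := pvScat (fun (_ : Bool) (_ : Int) => true) false
        ((min k (w - 1) + 1 - max 0 (k - m + 1)).toNat) (max 0 (k - m + 1)) (min k (w - 1) + 1)
        sd.2 (by omega) rfl (by omega)
      refine ⟨by rw [hlen1, h1], by rw [hlen2, h2], fun idx hidx hidxw => ⟨?_, ?_⟩⟩
      · rw [hget1 idx hidx]
        unfold pvDelta
        by_cases hg : idx ≤ k ∧ k < idx + m
        · rw [if_pos ((hguard idx hidx hidxw).mpr hg), if_pos hg, if_neg (by simp),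
            if_neg (by simp), if_pos rfl]
          ring
        · rw [if_neg (fun h => hg ((hguard idx hidx hidxw).mp h)), if_neg hg]; ring
      · rw [hget2 idx hidx]
        by_cases hg : idx ≤ k ∧ k < idx + m
        · rw [if_pos ((hguard idx hidx hidxw).mpr hg)]
          simp [hg]
        · rw [if_neg (fun h => hg ((hguard idx hidx hidxw).mp h))]
          simp [hg]

-- the outer scatter loop, read back pointwise: score = old + Σ deltas, dw = old || any-DW-covering
theorem pvOuter (wv : List Int) (m w : Int) (hw : 0 ≤ w) :
    ∀ (xs : List (Int × String)) (sd : List Int × List Bool),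
    sd.1.length = w.toNat → sd.2.length = w.toNat →
    (xs.foldl (pvStepB wv m w) sd).1.length = w.toNat ∧
    (xs.foldl (pvStepB wv m w) sd).2.length = w.toNat ∧
    ∀ idx : Int, 0 ≤ idx → idx < w →
      PySem.List.pyGetD (xs.foldl (pvStepB wv m w) sd).1 idx 0
        = PySem.List.pyGetD sd.1 idx 0 + (xs.map (fun kc => pvDelta wv m kc idx)).sum ∧
      PySem.List.pyGetD (xs.foldl (pvStepB wv m w) sd).2 idx false
        = (PySem.List.pyGetD sd.2 idx false
           || xs.any (fun kc => kc.2 == "DW" && decide (idx ≤ kc.1 ∧ kc.1 < idx + m))) := by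
  intro xs
  induction xs with
  | nil =>
    intro sd h1 h2
    exact ⟨h1, h2, fun idx _ _ => ⟨by simp, by simp⟩⟩
  | cons x t ih =>
    intro sd h1 h2
    rw [List.foldl_cons]
    obtain ⟨s1, s2, sget⟩ := pvStepB_char wv m w hw x sd h1 h2
    obtain ⟨r1, r2, rget⟩ := ih (pvStepB wv m w sd x) s1 s2
    refine ⟨r1, r2, fun idx hidx hidxw => ?_⟩
    obtain ⟨rg1, rg2⟩ := rget idx hidx hidxw
    obtain ⟨sg1, sg2⟩ := sget idx hidx hidxw
    constructor
    · rw [rg1, sg1, List.map_cons, List.sum_cons]; ring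
    · rw [rg2, sg2, List.any_cons, Bool.or_assoc]

-- a sum over range n of terms supported on the window [a, a+m) is the sum over the window
theorem pvWindowSum (g : Nat → Int) (a m n : Nat) (h : a + m ≤ n) :
    ((List.range n).map (fun k => if a ≤ k ∧ k < a + m then g k else 0)).sum
    = ((List.range m).map (fun j => g (a + j))).sum := by
  obtain ⟨e, rfl⟩ : ∃ e, n = a + m + e := ⟨n - (a + m), by omega⟩
  rw [List.range_add, List.range_add, List.map_append, List.map_append,
    List.sum_append, List.sum_append, List.map_map, List.map_map]
  have h1 : (List.range a).map (fun k => if a ≤ k ∧ k < a + m then g k else 0)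
      = (List.range a).map (fun _ => (0 : Int)) :=
    List.map_congr_left (fun k hk => by
      rw [if_neg (by have := List.mem_range.mp hk; omega)])
  have h2 : (List.range m).map ((fun k => if a ≤ k ∧ k < a + m then g k else 0) ∘ (fun x => a + x))
      = (List.range m).map (fun j => g (a + j)) :=
    List.map_congr_left (fun j hj => by
      simp only [Function.comp_apply]
      rw [if_pos (by have := List.mem_range.mp hj; omega)])
  have h3 : (List.range e).map ((fun k => if a ≤ k ∧ k < a + m then g k else 0) ∘ (fun x => a + m + x))
      = (List.range e).map (fun _ => (0 : Int)) :=
    List.map_congr_left (fun x _ => by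
      simp only [Function.comp_apply]
      rw [if_neg (by omega)])
  rw [h1, h2, h3, PySem.List.sum_map_const_int, PySem.List.sum_map_const_int]
  ring

-- A's window score in B's vocabulary: word total plus the scattered deltas, doubled if a DW is covered
theorem pvScoreA_char (lst : List String) (wv : List Int) (m i : Int)
    (hm : m = (wv.length : Int)) (h0 : 0 ≤ i) (hiw : i + m ≤ (lst.length : Int)) :
    pvScoreA lst wv m i
    = (if (PySem.List.enumerate lst).any (fun kc =>
          kc.2 == "DW" && decide (i ≤ kc.1 ∧ kc.1 < i + m))
       then 2 * (wv.sum + ((PySem.List.enumerate lst).map (fun kc => pvDelta wv m kc i)).sum)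
       else wv.sum + ((PySem.List.enumerate lst).map (fun kc => pvDelta wv m kc i)).sum) := by
  unfold pvScoreA
  have hstep : (fun (p : Int × Int) j =>
      if PySem.List.pyGetD lst (i + j) "" = "DL" then (p.1 + PySem.List.pyGetD wv j 0 * 2, p.2)
      else if PySem.List.pyGetD lst (i + j) "" = "TL" then (p.1 + PySem.List.pyGetD wv j 0 * 3, p.2)
      else if PySem.List.pyGetD lst (i + j) "" = "DW" then (p.1, 2)
      else (p.1 + PySem.List.pyGetD wv j 0, p.2))
      = (fun (p : Int × Int) j =>
        (p.1 + pvG lst wv i j, if PySem.List.pyGetD lst (i + j) "" = "DW" then 2 else p.2)) := by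
    funext p j
    unfold pvG
    split_ifs with h1 h2 <;> simp_all
  rw [hstep, PySem.List.foldl_prod_mk (f := fun a j => a + pvG lst wv i j)
      (g := fun m2 j => if PySem.List.pyGetD lst (i + j) "" = "DW" then 2 else m2),
    PySem.List.foldl_add, pvFoldTwo]
  simp only [zero_add]
  -- the base sums agree
  have hbase : ((PySem.List.pyRange 0 m).map (pvG lst wv i)).sum
      = wv.sum + ((PySem.List.enumerate lst).map (fun kc => pvDelta wv m kc i)).sum := by
    -- enumerate as a range comprehension, everything over List.range
    rw [PySem.List.enumerate_eq_map_pyRange lst "", List.map_map]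
    have hlen : PySem.List.len lst = ((lst.length : Nat) : Int) := by simp [pysem]
    rw [hlen, PySem.List.pyRange_zero_natCast, List.map_map]
    -- the delta terms, as a Nat-indexed windowed sum
    have hd : List.map
          (((fun kc => pvDelta wv m kc i) ∘ fun j => (j, PySem.List.pyGetD lst j "")) ∘ (fun k : Nat => (k : Int)))
          (List.range lst.length)
        = (List.range lst.length).map (fun k =>
            if i.toNat ≤ k ∧ k < i.toNat + wv.length then
              (if PySem.List.pyGetD lst (k : Int) "" = "DL" then PySem.List.pyGetD wv ((k : Int) - i) 0
               else if PySem.List.pyGetD lst (k : Int) "" = "TL" then 2 * PySem.List.pyGetD wv ((k : Int) - i) 0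
               else if PySem.List.pyGetD lst (k : Int) "" = "DW" then - PySem.List.pyGetD wv ((k : Int) - i) 0
               else 0)
            else 0) :=
      List.map_congr_left (fun k _ => by
        simp only [Function.comp_apply]
        unfold pvDelta
        by_cases hg : i ≤ (k : Int) ∧ (k : Int) < i + m
        · rw [if_pos (show i ≤ ((k : Int), PySem.List.pyGetD lst (k : Int) "").1 ∧
              ((k : Int), PySem.List.pyGetD lst (k : Int) "").1 < i + m from hg),
            if_pos (show i.toNat ≤ k ∧ k < i.toNat + wv.length by omega)]
        · rw [if_neg (show ¬(i ≤ ((k : Int), PySem.List.pyGetD lst (k : Int) "").1 ∧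
              ((k : Int), PySem.List.pyGetD lst (k : Int) "").1 < i + m) from hg),
            if_neg (show ¬(i.toNat ≤ k ∧ k < i.toNat + wv.length) by omega)])
    rw [hd, pvWindowSum _ i.toNat wv.length lst.length (by omega)]
    -- wv.sum as a range sum
    have hwv : wv.sum = ((List.range wv.length).map (fun j => wv.getD j 0)).sum := by
      conv_lhs => rw [← PySem.List.map_pyGetD_pyRange_zero' wv 0]
      rw [PySem.List.pyRange_zero_natCast, List.map_map]
      exact congrArg List.sum (List.map_congr_left (fun j _ => by
        simp only [Function.comp_apply]
        rw [PySem.List.pyGetD_natCast]))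
    rw [hwv, ← PySem.List.sum_map_add_int]
    -- left side over List.range
    rw [hm, PySem.List.pyRange_zero_natCast, List.map_map]
    exact congrArg List.sum (List.map_congr_left (fun j hj => by
      have hjlt : j < wv.length := List.mem_range.mp hj
      simp only [Function.comp_apply]
      have hcast : ((i.toNat + j : Nat) : Int) = i + (j : Int) := by omega
      rw [hcast, show i + (j : Int) - i = (j : Int) from by omega]
      unfold pvG
      rw [PySem.List.pyGetD_natCast]
      split_ifs <;> ring))
  rw [hbase]
  -- the DW conditions agree
  have hdw : (∃ j ∈ PySem.List.pyRange 0 m, PySem.List.pyGetD lst (i + j) "" = "DW")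
      ↔ ((PySem.List.enumerate lst).any (fun kc =>
          kc.2 == "DW" && decide (i ≤ kc.1 ∧ kc.1 < i + m)) = true) := by
    rw [List.any_eq_true]
    constructor
    · rintro ⟨j, hj, hcell⟩
      obtain ⟨hj0, hjm⟩ := PySem.List.mem_pyRange_one.mp hj
      have hk : (i + j).toNat < lst.length := by omega
      have hcell' : lst[(i + j).toNat] = "DW" := by
        rw [show (i + j) = (((i + j).toNat : Nat) : Int) from by omega,
          PySem.List.pyGetD_natCast, List.getD_eq_getElem lst "" hk] at hcell
        exact hcell
      refine ⟨((0 : Int) + (((i + j).toNat : Nat) : Int), lst[(i + j).toNat]),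
        (PySem.List.mem_enumerate_iff _ _ _).mpr ⟨(i + j).toNat, hk, rfl⟩, ?_⟩
      simp only [hcell', Bool.and_eq_true, beq_iff_eq, decide_eq_true_eq]
      exact ⟨by simp, by omega⟩
    · rintro ⟨kc, hkc, hprop⟩
      obtain ⟨k, hklt, rfl⟩ := (PySem.List.mem_enumerate_iff _ _ _).mp hkc
      simp only [Bool.and_eq_true, beq_iff_eq, decide_eq_true_eq] at hprop
      obtain ⟨hcell, hge, hlt⟩ := hprop
      refine ⟨(0 + (k : Int)) - i, PySem.List.mem_pyRange_one.mpr (by omega), ?_⟩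
      rw [show i + ((0 + (k : Int)) - i) = ((k : Nat) : Int) from by omega,
        PySem.List.pyGetD_natCast, List.getD_eq_getElem lst "" hklt]
      simpa using hcell
  by_cases hQ : ∃ j ∈ PySem.List.pyRange 0 m, PySem.List.pyGetD lst (i + j) "" = "DW"
  · rw [if_pos hQ, if_pos (hdw.mp hQ)]; ring
  · rw [if_neg hQ, if_neg (fun h => hQ (hdw.mpr h))]; ring

-- ===== VERDICT (by name: the statement is the Claim_ definition above) =====
theorem best_start_spec : Claim_equal_best_start := by
  intro lst word hdom hpre
  obtain ⟨hletters, hlen⟩ := hpre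
  unfold Spec_best_start best_start best_start_alt
  simp only []
  have hletters' : ∀ c ∈ word.toList, c ∈ pvLetterChars := fun c hc =>
    List.contains_iff_mem.mp (List.all_eq_true.mp hletters c hc)
  have hwv : word.toList.map (fun letter =>
      (((pvLettersA.zip pvPointsA).foldl (fun d kv => d.insert kv.1 kv.2) PySem.Dict.empty).get?
        (PySem.Str.upper (String.singleton letter))).getD 0)
      = word.toList.map (fun c =>
          PySem.List.pyGetD pvPtsB (((PySem.Chars.upperChar c).toNat : Int) - 65) 0) :=
    List.map_congr_left (fun c hc => pvCharVal_eq c (hletters' c hc))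
  rw [hwv]
  set wv : List Int := word.toList.map (fun c =>
    PySem.List.pyGetD pvPtsB (((PySem.Chars.upperChar c).toNat : Int) - 65) 0) with hwvdef
  set m : Int := (word.toList.length : Int) with hmdef
  set w : Int := (lst.length : Int) - m + 1 with hwdef
  have hwvlen : m = (wv.length : Int) := by rw [hwvdef, List.length_map]
  have hmle : m ≤ (lst.length : Int) := by rw [hmdef]; exact_mod_cast hlen
  have hw1 : 1 ≤ w := by omega
  -- A side: the dict-building loop is an argmax over the start range
  have hfunA : (fun (mv : PySem.Dict Int Int) i =>
      let p : Int × Int :=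
        (PySem.List.pyRange 0 m 1).foldl (fun (p : Int × Int) j =>
          if PySem.List.pyGetD lst (i + j) "" = "DL" then (p.1 + PySem.List.pyGetD wv j 0 * 2, p.2)
          else if PySem.List.pyGetD lst (i + j) "" = "TL" then (p.1 + PySem.List.pyGetD wv j 0 * 3, p.2)
          else if PySem.List.pyGetD lst (i + j) "" = "DW" then (p.1, 2)
          else (p.1 + PySem.List.pyGetD wv j 0, p.2)) (0, 1)
      mv.insert i (p.1 * p.2))
      = fun (mv : PySem.Dict Int Int) i => mv.insert i (pvScoreA lst wv m i) := rfl
  rw [hfunA, pvArgmaxA _ (PySem.List.nodup_pyRange_one _ _)]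
  -- B side: the enumerate loop is the scatter loop
  have hfunB : (fun (sd : List Int × List Bool) (kc : Int × String) =>
      if kc.2 = "DL" ∨ kc.2 = "TL" ∨ kc.2 = "DW" then
        (PySem.List.pyRange (max 0 (kc.1 - m + 1)) (min kc.1 (w - 1) + 1) 1).foldl (fun sd i =>
          if kc.2 = "DL" then
            (PySem.List.pySetD sd.1 i (PySem.List.pyGetD sd.1 i 0 + PySem.List.pyGetD wv (kc.1 - i) 0), sd.2)
          else if kc.2 = "TL" then
            (PySem.List.pySetD sd.1 i (PySem.List.pyGetD sd.1 i 0 + 2 * PySem.List.pyGetD wv (kc.1 - i) 0), sd.2)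
          else
            (PySem.List.pySetD sd.1 i (PySem.List.pyGetD sd.1 i 0 - PySem.List.pyGetD wv (kc.1 - i) 0),
             PySem.List.pySetD sd.2 i true)) sd
      else sd) = pvStepB wv m w := rfl
  rw [hfunB]
  obtain ⟨r1, r2, rget⟩ := pvOuter wv m w (by omega) (PySem.List.enumerate lst)
    (List.replicate w.toNat wv.sum, List.replicate w.toNat false) (by simp) (by simp)
  -- the per-window values agree
  have hptw : ∀ x ∈ PySem.List.pyRange 0 w 1, pvScoreA lst wv m x
      = (fun i =>
          if PySem.List.pyGetD ((PySem.List.enumerate lst).foldl (pvStepB wv m w)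
              (List.replicate w.toNat wv.sum, List.replicate w.toNat false)).2 i false
          then 2 * PySem.List.pyGetD ((PySem.List.enumerate lst).foldl (pvStepB wv m w)
              (List.replicate w.toNat wv.sum, List.replicate w.toNat false)).1 i 0
          else PySem.List.pyGetD ((PySem.List.enumerate lst).foldl (pvStepB wv m w)
              (List.replicate w.toNat wv.sum, List.replicate w.toNat false)).1 i 0) x := by
    intro x hx
    obtain ⟨hx0, hxw⟩ := PySem.List.mem_pyRange_one.mp hx
    obtain ⟨rg1, rg2⟩ := rget x hx0 hxw
    have hrep1 : PySem.List.pyGetD (List.replicate w.toNat wv.sum) x 0 = wv.sum := by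
      rw [PySem.List.pyGetD_of_nonneg _ _ hx0, List.getD_eq_getElem _ _ (by simp; omega),
        List.getElem_replicate]
    have hrep2 : PySem.List.pyGetD (List.replicate w.toNat false) x false = false := by
      rw [PySem.List.pyGetD_of_nonneg _ _ hx0, List.getD_eq_getElem _ _ (by simp; omega),
        List.getElem_replicate]
    simp only []
    rw [rg1, rg2, hrep1, hrep2, Bool.false_or]
    rw [pvScoreA_char lst wv m x hwvlen hx0 (by omega)]
  rw [pvMaxCongr _ _ _ hptw]
  exact (pvFoldB _ _ (fun p i => rfl) (fun p b i => rfl) _ 0).symm
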